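-- pv_equiv track=rewrite | github.com/mk04366/Library_Recommendation | Sample.py | WeightedEdge_Create
-- ===== SOURCE A (Python) =====
-- def WeightedEdge_Create(datadict):
--     final_lst=[]
--     alrdy_traversed = []
--     for person in datadict.keys():
--         alrdy_traversed.append(person)
--         books_read=datadict[person]
--         for neighbor in datadict.keys():
--             weight=0
--             if neighbor in alrdy_traversed:
--                 continue
--             for n_books in datadict[neighbor].keys():
--                 if n_books in books_read.keys():
--                     currentchoice=books_read[n_books]
--                     neighborchoice=datadict[neighbor][n_books]
--                     if currentchoice==neighborchoice:
--                         weight+=1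
--                     else:
--                         weight-=1
--             final_lst.append((person, neighbor, weight))
--
--     return final_lst
-- ===== SOURCE B (Python) =====
-- def WeightedEdge_Create(datadict):
--     persons = list(datadict)
--     # invert: book -> list of (person, choice), in person (insertion) order
--     by_book = {}
--     for p in persons:
--         for book, choice in datadict[p].items():
--             by_book.setdefault(book, []).append((p, choice))
--     # accumulate +-1 per agreeing/disagreeing reader pair into a pair->weight dict
--     w = {}
--     for readers in by_book.values():
--         for k, (p, cp) in enumerate(readers):
--             for q, cq in readers[k + 1:]:
--                 key = (p, q)
--                 w[key] = w.get(key, 0) + (1 if cp == cq else -1)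
--     # emit the upper triangle in person order
--     out = []
--     for i, p in enumerate(persons):
--         for q in persons[i + 1:]:
--             out.append((p, q, w.get((p, q), 0)))
--     return out
-- ===== Notes on version B (the rewrite author's own statement) =====
-- stated objective: faster
-- what changed: Instead of scanning every person pair and intersecting their book dicts (O(n^2*B)), B inverts the data into a book->readers index, accumulates +-1 into a pair->weight dict over co-readers of each book, and then emits the upper-triangle pairs in order with a default weight of 0.
import Mathlib
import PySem

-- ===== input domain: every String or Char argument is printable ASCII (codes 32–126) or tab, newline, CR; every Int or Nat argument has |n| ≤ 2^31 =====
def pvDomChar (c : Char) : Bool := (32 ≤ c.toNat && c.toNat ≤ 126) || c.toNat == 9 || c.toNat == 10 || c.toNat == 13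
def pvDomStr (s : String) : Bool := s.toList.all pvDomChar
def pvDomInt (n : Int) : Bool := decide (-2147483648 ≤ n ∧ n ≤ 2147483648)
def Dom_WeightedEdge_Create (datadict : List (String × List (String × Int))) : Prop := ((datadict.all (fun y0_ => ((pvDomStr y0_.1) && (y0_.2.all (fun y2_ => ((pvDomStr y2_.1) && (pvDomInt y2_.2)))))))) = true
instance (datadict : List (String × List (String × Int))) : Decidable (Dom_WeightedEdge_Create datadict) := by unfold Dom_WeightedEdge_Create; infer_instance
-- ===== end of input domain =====

-- B inverts the data by book and accumulates pair weights once per shared book (faster by the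
-- timing run); return-value equivalence is proved, neither version mutates its argument.

-- shared input decoding: the Python argument is a dict of dicts; the assoc-list input is
-- normalised exactly as Python's dict construction does (overwrite keeps position, last value)
def toDict (datadict : List (String × List (String × Int))) :
    PySem.Dict String (PySem.Dict String Int) :=
  PySem.Dict.ofList (datadict.map (fun p => (p.1, PySem.Dict.ofList p.2)))

-- ===== PORT A =====
def WeightedEdge_Create (datadict : List (String × List (String × Int))) : List (String × String × Int) :=
  let d := toDict datadict
  (d.keys.foldl
    (fun (st : List (String × String × Int) × List String) person =>
      let alrdy := st.2 ++ [person]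
      let books := d.getD person PySem.Dict.empty
      let fl := d.keys.foldl
        (fun fl neighbor =>
          if alrdy.contains neighbor then fl
          else
            let nd := d.getD neighbor PySem.Dict.empty
            let weight := nd.keys.foldl
              (fun weight b =>
                if books.contains b then
                  if books.getD b 0 = nd.getD b 0 then weight + 1 else weight - 1
                else weight) 0
            fl ++ [(person, neighbor, weight)])
        st.1
      (fl, alrdy))
    ([], [])).1

-- ===== PORT B =====
-- the enumerate/slice pair loop of Source B: for each reader, pair it with every later reader
def pairAcc : List (String × Int) → PySem.Dict (String × String) Int → PySem.Dict (String × String) Int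
  | [], w => w
  | (p, cp) :: rest, w =>
    pairAcc rest (rest.foldl
      (fun w qc => w.modify (p, qc.1) 0 (· + (if cp = qc.2 then 1 else -1))) w)

-- the enumerate/slice emission loop of Source B: upper triangle in person order
def emitPairs : List String → PySem.Dict (String × String) Int → List (String × String × Int)
  | [], _ => []
  | p :: rest, w => rest.map (fun q => (p, q, w.getD (p, q) 0)) ++ emitPairs rest w

def WeightedEdge_Create_alt (datadict : List (String × List (String × Int))) : List (String × String × Int) :=
  let d := toDict datadict
  let persons := d.keys
  let byBook := persons.foldl
    (fun bb p =>
      (d.getD p PySem.Dict.empty).items.foldl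
        (fun bb bc => bb.modify bc.1 [] (· ++ [(p, bc.2)])) bb)
    PySem.Dict.empty
  let w := byBook.values.foldl (fun w readers => pairAcc readers w) PySem.Dict.empty
  emitPairs persons w

-- ===== PRECONDITION & SPEC =====
def Spec_WeightedEdge_Create (datadict : List (String × List (String × Int))) (out : List (String × String × Int)) : Prop := out = WeightedEdge_Create_alt datadict
instance (datadict : List (String × List (String × Int))) (out : List (String × String × Int)) : Decidable (Spec_WeightedEdge_Create datadict out) := by unfold Spec_WeightedEdge_Create; infer_instance

-- ===== CLAIM (what is proved, stated in full; the proofs are below) =====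
def Claim_equal_WeightedEdge_Create : Prop := ∀ (datadict : List (String × List (String × Int))), Dom_WeightedEdge_Create datadict → Spec_WeightedEdge_Create datadict (WeightedEdge_Create datadict)

-- ===== LEMMAS AND PROOFS =====

-- abbreviations for the proof
def bk (d : PySem.Dict String (PySem.Dict String Int)) (p : String) : PySem.Dict String Int :=
  d.getD p PySem.Dict.empty

-- A's per-book contribution to the weight of a pair
def term (dp dq : PySem.Dict String Int) (b : String) : Int :=
  if dp.contains b then (if dp.getD b 0 = dq.getD b 0 then 1 else -1) else 0

-- A's weight for the pair (p, q)
def AW (d : PySem.Dict String (PySem.Dict String Int)) (p q : String) : Int :=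
  ((bk d q).keys.map (term (bk d p) (bk d q))).sum

-- the common upper-triangle output skeleton
def tri (W : String → String → Int) : List String → List (String × String × Int)
  | [] => []
  | p :: rest => rest.map (fun q => (p, q, W p q)) ++ tri W rest

-- sign of an agreeing/disagreeing pair of choices
def sgn (cp cq : Int) : Int := if cp = cq then 1 else -1

-- total delta that pairAcc adds to key k
def SP : List (String × Int) → (String × String) → Int
  | [], _ => 0
  | pc :: rest, k =>
    (rest.map (fun qc => if (pc.1, qc.1) = k then sgn pc.2 qc.2 else 0)).sum + SP rest k

-- the flattened entry list behind B's by_book index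
def entriesOf (d : PySem.Dict String (PySem.Dict String Int)) : List (String × (String × Int)) :=
  d.keys.flatMap (fun p => (bk d p).items.map (fun bc => (bc.1, (p, bc.2))))

-- readers of book b among the persons of l, in order
def rOf (d : PySem.Dict String (PySem.Dict String Int)) (b : String) (l : List String) :
    List (String × Int) :=
  l.flatMap (fun p => if (bk d p).contains b then [(p, (bk d p).getD b 0)] else [])

lemma inner_fold (books nd : PySem.Dict String Int) (l : List String) (w0 : Int) :
    l.foldl (fun weight b =>
      if books.contains b then
        if books.getD b 0 = nd.getD b 0 then weight + 1 else weight - 1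
      else weight) w0
    = w0 + (l.map (term books nd)).sum := by
  induction l generalizing w0 with
  | nil => simp
  | cons b t ih =>
    simp only [List.foldl_cons, List.map_cons, List.sum_cons, ih, term]
    split_ifs <;> ring

lemma items_filter_key (dd : PySem.Dict String Int) (b : String) (h : dd.keys.Nodup) :
    dd.items.filter (fun bc => bc.1 == b)
      = if dd.contains b then [(b, dd.getD b 0)] else [] := by
  obtain ⟨l⟩ := dd
  induction l with
  | nil => simp [PySem.Dict.contains]
  | cons kv t ih =>
    obtain ⟨k, v⟩ := kv
    have hkeys : ({ items := (k, v) :: t } : PySem.Dict String Int).keys = k :: ({ items := t } : PySem.Dict String Int).keys := by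
      simp [PySem.Dict.keys]
    rw [hkeys] at h
    have hk : k ∉ ({ items := t } : PySem.Dict String Int).keys := (List.nodup_cons.mp h).1
    have ht := ih (List.nodup_cons.mp h).2
    by_cases hb : k = b
    · subst hb
      have hcont : ({ items := t } : PySem.Dict String Int).contains k = false := by
        cases hcc : ({ items := t } : PySem.Dict String Int).contains k with
        | false => rfl
        | true => exact absurd ((PySem.Dict.contains_iff_mem_keys _ _).mp hcc) hk
      rw [hcont, if_neg (by simp)] at ht
      have hcont2 : ({ items := (k, v) :: t } : PySem.Dict String Int).contains k = true := by
        simp [PySem.Dict.contains]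
      rw [hcont2, if_pos rfl]
      have : ({ items := (k, v) :: t } : PySem.Dict String Int).getD k 0 = v := by
        simp [PySem.Dict.getD, PySem.Dict.get?_mk_cons]
      rw [this]
      simp only [List.filter_cons]
      simp [ht]
    · have hcont : ({ items := (k, v) :: t } : PySem.Dict String Int).contains b
          = ({ items := t } : PySem.Dict String Int).contains b := by
        simp [PySem.Dict.contains, hb]
      have hget : ({ items := (k, v) :: t } : PySem.Dict String Int).getD b 0
          = ({ items := t } : PySem.Dict String Int).getD b 0 := by
        simp [PySem.Dict.getD, PySem.Dict.get?_mk_cons, hb]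
      rw [hcont, hget]
      simp only [List.filter_cons]
      simp [hb, ht]

-- every inner dict of toDict has nodup keys
lemma mem_items_update {κ ν : Type} [BEq κ] [LawfulBEq κ]
    (ps : List (κ × ν)) (d : PySem.Dict κ ν) (p : κ × ν)
    (h : p ∈ (d.update ps).items) : p ∈ d.items ∨ p ∈ ps := by
  induction ps generalizing d with
  | nil => exact Or.inl h
  | cons q t ih =>
    rcases ih (d.insert q.1 q.2) (show p ∈ ((d.insert q.1 q.2).update t).items from h) with h' | h'
    · rcases (PySem.Dict.mem_items_insert d q.1 q.2 p).mp h' with h'' | h''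
      · exact Or.inr (by simp [h''])
      · exact Or.inl h''.1
    · exact Or.inr (List.mem_cons_of_mem _ h')

lemma bk_nodup (datadict : List (String × List (String × Int))) (p : String) :
    (bk (toDict datadict) p).keys.Nodup := by
  unfold bk
  rcases hg : (toDict datadict).get? p with _ | v
  · rw [PySem.Dict.getD, hg]
    simp [PySem.Dict.keys_empty]
  · rw [PySem.Dict.getD, hg]
    have hm : (p, v) ∈ (toDict datadict).items := PySem.Dict.mem_items_of_get?_eq_some _ hg
    have : (p, v) ∈ (datadict.map (fun p => (p.1, PySem.Dict.ofList p.2))) := by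
      rcases mem_items_update _ _ _ hm with h | h
      · simp [PySem.Dict.empty] at h
      · exact h
    rcases List.mem_map.mp this with ⟨y, _, hy⟩
    have : v = PySem.Dict.ofList y.2 := by
      have := congrArg Prod.snd hy; simpa using this.symm
    rw [this]
    simp [PySem.Dict.nodup_keys_ofList y.2]

-- ---------- A's shape: tri (AW d) over the key list ----------

lemma stepA_fst (d : PySem.Dict String (PySem.Dict String Int))
    (a : List String) (p : String) (rest : List String)
    (fl : List (String × String × Int))
    (hnd : (a ++ p :: rest).Nodup) (hk : d.keys = a ++ p :: rest) :
    d.keys.foldl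
      (fun fl neighbor =>
        if (a ++ [p]).contains neighbor then fl
        else
          fl ++ [(p, neighbor,
            (d.getD neighbor PySem.Dict.empty).keys.foldl
              (fun weight b =>
                if (d.getD p PySem.Dict.empty).contains b then
                  if (d.getD p PySem.Dict.empty).getD b 0
                      = (d.getD neighbor PySem.Dict.empty).getD b 0 then weight + 1
                  else weight - 1
                else weight) 0)]) fl
    = fl ++ rest.map (fun q => (p, q, AW d p q)) := by
  have hflip : ∀ (l : List String) (acc : List (String × String × Int)),
      l.foldl (fun fl neighbor =>
        if (a ++ [p]).contains neighbor then fl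
        else fl ++ [(p, neighbor,
            (d.getD neighbor PySem.Dict.empty).keys.foldl
              (fun weight b =>
                if (d.getD p PySem.Dict.empty).contains b then
                  if (d.getD p PySem.Dict.empty).getD b 0
                      = (d.getD neighbor PySem.Dict.empty).getD b 0 then weight + 1
                  else weight - 1
                else weight) 0)]) acc
      = l.foldl (fun fl neighbor =>
        if (!(a ++ [p]).contains neighbor) then fl ++ [(p, neighbor,
            (d.getD neighbor PySem.Dict.empty).keys.foldl
              (fun weight b =>
                if (d.getD p PySem.Dict.empty).contains b then
                  if (d.getD p PySem.Dict.empty).getD b 0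
                      = (d.getD neighbor PySem.Dict.empty).getD b 0 then weight + 1
                  else weight - 1
                else weight) 0)] else fl) acc := by
    intro l acc
    apply List.foldl_ext
    intro acc' x _
    cases hc : (a ++ [p]).contains x <;> simp
  rw [hflip, PySem.List.foldl_append_if, hk]
  congr 1
  have hfilter : (a ++ p :: rest).filter (fun x => !(a ++ [p]).contains x) = rest := by
    have h1 : (a ++ p :: rest) = (a ++ [p]) ++ rest := by simp
    rw [h1, List.filter_append]
    have h2 : (a ++ [p]).filter (fun x => !(a ++ [p]).contains x) = [] := by
      apply List.filter_eq_nil_iff.mpr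
      intro x hx
      have hc : (a ++ [p]).contains x = true := List.contains_iff_mem.mpr hx
      rw [hc]
      decide
    have hnd' : ((a ++ [p]) ++ rest).Nodup := by rw [← h1]; exact hnd
    have h3 : rest.filter (fun x => !(a ++ [p]).contains x) = rest := by
      apply List.filter_eq_self.mpr
      intro x hx
      have hxn : x ∉ (a ++ [p]) := fun hmem =>
        (List.disjoint_of_nodup_append hnd') hmem hx
      have hc : (a ++ [p]).contains x = false := by
        cases hcc : (a ++ [p]).contains x with
        | false => rfl
        | true => exact absurd (List.contains_iff_mem.mp hcc) hxn
      rw [hc]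
      decide
    rw [h2, h3]; simp
  rw [hfilter]
  apply List.map_congr_left
  intro q _
  rw [inner_fold]
  simp [AW, bk]

lemma A_fold (d : PySem.Dict String (PySem.Dict String Int)) :
    ∀ (l a : List String) (fl : List (String × String × Int)),
      (a ++ l).Nodup → d.keys = a ++ l →
      (l.foldl
        (fun (st : List (String × String × Int) × List String) person =>
          let alrdy := st.2 ++ [person]
          let books := d.getD person PySem.Dict.empty
          let fl := d.keys.foldl
            (fun fl neighbor =>
              if alrdy.contains neighbor then fl
              else
                let nd := d.getD neighbor PySem.Dict.empty
                let weight := nd.keys.foldl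
                  (fun weight b =>
                    if books.contains b then
                      if books.getD b 0 = nd.getD b 0 then weight + 1 else weight - 1
                    else weight) 0
                fl ++ [(person, neighbor, weight)])
            st.1
          (fl, alrdy))
        (fl, a)).1 = fl ++ tri (AW d) l := by
  intro l
  induction l with
  | nil => intro a fl _ _; simp [tri]
  | cons p rest ih =>
    intro a fl hnd hk
    simp only [List.foldl_cons]
    have hstep := stepA_fst d a p rest fl hnd hk
    rw [hstep]
    have hnd' : ((a ++ [p]) ++ rest).Nodup := by simpa using hnd
    have hk' : d.keys = (a ++ [p]) ++ rest := by simpa using hk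
    rw [ih (a ++ [p]) (fl ++ rest.map (fun q => (p, q, AW d p q))) hnd' hk']
    simp [tri]

lemma A_eq_tri (datadict : List (String × List (String × Int))) :
    WeightedEdge_Create datadict = tri (AW (toDict datadict)) (toDict datadict).keys := by
  have hnd : (toDict datadict).keys.Nodup := PySem.Dict.nodup_keys_ofList _
  have := A_fold (toDict datadict) (toDict datadict).keys [] [] (by simpa using hnd) rfl
  simpa [WeightedEdge_Create] using this

-- ---------- B's weight dict ----------

lemma byBook_eq (d : PySem.Dict String (PySem.Dict String Int)) :
    d.keys.foldl
      (fun bb p =>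
        (d.getD p PySem.Dict.empty).items.foldl
          (fun bb bc => bb.modify bc.1 [] (· ++ [(p, bc.2)])) bb)
      PySem.Dict.empty
    = (entriesOf d).foldl (fun bb e => bb.modify e.1 [] (· ++ [e.2])) PySem.Dict.empty := by
  unfold entriesOf
  rw [List.foldl_flatMap]
  apply List.foldl_ext
  intro acc p _
  rw [List.foldl_map]
  rfl

lemma rd_eq (datadict : List (String × List (String × Int))) (b : String) :
    (((entriesOf (toDict datadict)).foldl
        (fun bb e => bb.modify e.1 [] (· ++ [e.2])) PySem.Dict.empty).getD b [])
      = rOf (toDict datadict) b (toDict datadict).keys := by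
  set d := toDict datadict with hd
  rw [PySem.Dict.getD_foldl_modify_append, PySem.Dict.getD_empty]
  unfold entriesOf rOf
  rw [List.filter_flatMap, List.map_flatMap]
  apply List.flatMap_congr
  intro p hp
  rw [List.filter_map]
  have hcomp : ((fun e : String × String × Int => e.1 == b) ∘ fun bc : String × Int => (bc.1, (p, bc.2)))
      = fun bc : String × Int => bc.1 == b := rfl
  rw [hcomp, items_filter_key (bk d p) b (bk_nodup datadict p)]
  unfold bk
  split_ifs <;> simp

lemma inner_pair (p : String) (cp : Int) (rest : List (String × Int))
    (w : PySem.Dict (String × String) Int) (k : String × String) :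
    (rest.foldl (fun w qc => w.modify (p, qc.1) 0 (· + (if cp = qc.2 then 1 else -1))) w).getD k 0
    = w.getD k 0 + (rest.map (fun qc => if (p, qc.1) = k then sgn cp qc.2 else 0)).sum := by
  induction rest generalizing w with
  | nil => simp
  | cons qc t ih =>
    simp only [List.foldl_cons, List.map_cons, List.sum_cons, ih]
    rw [PySem.Dict.getD_modify]
    by_cases hk : k = (p, qc.1)
    · rw [if_pos hk, if_pos hk.symm, hk]
      unfold sgn; ring
    · rw [if_neg hk, if_neg (fun h => hk h.symm)]
      ring

lemma pairAcc_getD (R : List (String × Int)) (w : PySem.Dict (String × String) Int)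
    (k : String × String) :
    (pairAcc R w).getD k 0 = w.getD k 0 + SP R k := by
  induction R generalizing w with
  | nil => simp [pairAcc, SP]
  | cons pc t ih =>
    obtain ⟨p, cp⟩ := pc
    simp only [pairAcc, SP, ih, inner_pair]
    ring

lemma foldl_pairAcc (L : List (List (String × Int))) (w : PySem.Dict (String × String) Int)
    (k : String × String) :
    (L.foldl (fun w R => pairAcc R w) w).getD k 0
    = w.getD k 0 + (L.map (fun R => SP R k)).sum := by
  induction L generalizing w with
  | nil => simp
  | cons R t ih =>
    simp only [List.foldl_cons, List.map_cons, List.sum_cons, ih, pairAcc_getD]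
    ring

-- SP vanishes when no reader has first component p
lemma SP_zero (R : List (String × Int)) (p q : String)
    (h : ∀ x ∈ R, x.1 ≠ p) : SP R (p, q) = 0 := by
  induction R with
  | nil => simp [SP]
  | cons pc t ih =>
    simp only [SP]
    have h1 : (t.map (fun qc => if (pc.1, qc.1) = (p, q) then sgn pc.2 qc.2 else 0))
        = t.map (fun _ => (0 : Int)) := by
      apply List.map_congr_left
      intro x _
      rw [if_neg]
      intro hc
      exact h pc (by simp) (congrArg Prod.fst hc)
    rw [h1, ih (fun x hx => h x (by simp [hx]))]
    simp

lemma fst_rOf_mem (d : PySem.Dict String (PySem.Dict String Int)) (b : String)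
    (l : List String) (x : String × Int) (hx : x ∈ rOf d b l) : x.1 ∈ l := by
  unfold rOf at hx
  rcases List.mem_flatMap.mp hx with ⟨p, hp, hx'⟩
  split_ifs at hx' with hc
  · simp at hx'; simp [hx', hp]
  · simp at hx'

-- the inner sum of SP's head against the readers of a tail list
lemma sum_hits (d : PySem.Dict String (PySem.Dict String Int)) (b : String)
    (gp : Int) (q : String) :
    ∀ (m : List String), m.Nodup → q ∈ m →
    ((rOf d b m).map (fun qc => if qc.1 = q then sgn gp qc.2 else 0)).sum
      = if (bk d q).contains b then sgn gp ((bk d q).getD b 0) else 0 := by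
  intro m
  induction m with
  | nil => intro _ hq; simp at hq
  | cons r t ih =>
    intro hnd hq
    have hrt : rOf d b (r :: t)
        = (if (bk d r).contains b then [(r, (bk d r).getD b 0)] else []) ++ rOf d b t := by
      simp [rOf]
    rw [hrt, List.map_append, List.sum_append]
    by_cases hrq : r = q
    · subst hrq
      have hqn : r ∉ t := (List.nodup_cons.mp hnd).1
      have htz : ((rOf d b t).map (fun qc => if qc.1 = r then sgn gp qc.2 else 0)).sum = 0 := by
        have hmz : (rOf d b t).map (fun qc => if qc.1 = r then sgn gp qc.2 else 0)
            = (rOf d b t).map (fun _ => (0 : Int)) := by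
          apply List.map_congr_left
          intro x hx
          rw [if_neg]
          intro hc
          exact hqn (hc ▸ fst_rOf_mem d b t x hx)
        rw [hmz]; simp
      rw [htz]
      by_cases hc : (bk d r).contains b <;> simp [hc]
    · have hq' : q ∈ t := by
        rcases List.mem_cons.mp hq with h | h
        · exact absurd h.symm hrq
        · exact h
      rw [ih (List.nodup_cons.mp hnd).2 hq']
      by_cases hc : (bk d r).contains b <;> simp [hc, hrq]

-- central: SP over the readers of the full person list
lemma SP_rOf (d : PySem.Dict String (PySem.Dict String Int)) (b : String) :
    ∀ (a : List String) (p : String) (m : List String) (q : String),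
      (a ++ p :: m).Nodup → q ∈ m →
      SP (rOf d b (a ++ p :: m)) (p, q)
        = if ((bk d p).contains b && (bk d q).contains b)
          then sgn ((bk d p).getD b 0) ((bk d q).getD b 0) else 0 := by
  intro a
  induction a with
  | nil =>
    intro p m q hnd hq
    have hsplit : rOf d b ([] ++ p :: m)
        = (if (bk d p).contains b then [(p, (bk d p).getD b 0)] else []) ++ rOf d b m := by
      simp [rOf]
    rw [hsplit]
    have hpm : p ∉ m := by simpa using (List.nodup_cons.mp (by simpa using hnd)).1
    by_cases hc : (bk d p).contains b
    · rw [if_pos hc]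
      simp only [List.cons_append, List.nil_append, SP]
      have hz : SP (rOf d b m) (p, q) = 0 := by
        apply SP_zero
        intro x hx hc'
        exact hpm (hc' ▸ fst_rOf_mem d b m x hx)
      rw [hz]
      have hin : ((rOf d b m).map (fun qc => if (p, qc.1) = (p, q) then sgn ((bk d p).getD b 0) qc.2 else 0))
          = (rOf d b m).map (fun qc => if qc.1 = q then sgn ((bk d p).getD b 0) qc.2 else 0) := by
        apply List.map_congr_left
        intro x _
        congr 1
        simp [Prod.ext_iff]
      rw [hin, sum_hits d b _ q m (List.nodup_cons.mp (by simpa using hnd)).2 hq]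
      by_cases hcq : (bk d q).contains b <;> simp [hc, hcq]
    · rw [if_neg hc]
      simp only [List.nil_append]
      rw [SP_zero _ p q (fun x hx hc' => hpm (hc' ▸ fst_rOf_mem d b m x hx))]
      simp [hc]
  | cons r a' ih =>
    intro p m q hnd hq
    have hsplit : rOf d b ((r :: a') ++ p :: m)
        = (if (bk d r).contains b then [(r, (bk d r).getD b 0)] else [])
          ++ rOf d b (a' ++ p :: m) := by
      simp [rOf]
    rw [hsplit]
    have hnd' : (a' ++ p :: m).Nodup := (List.nodup_cons.mp (by simpa using hnd)).2
    have hrp : r ≠ p := by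
      have : r ∉ a' ++ p :: m := (List.nodup_cons.mp (by simpa using hnd)).1
      intro h; exact this (by simp [h])
    by_cases hc : (bk d r).contains b
    · rw [if_pos hc]
      simp only [List.cons_append, SP]
      have hz : ((rOf d b (a' ++ p :: m)).map
          (fun qc => if (r, qc.1) = (p, q) then sgn ((bk d r).getD b 0) qc.2 else 0))
          = (rOf d b (a' ++ p :: m)).map (fun _ => (0 : Int)) := by
        apply List.map_congr_left
        intro x _
        rw [if_neg]
        intro hc'
        exact hrp (congrArg Prod.fst hc')
      simp only [List.nil_append]
      rw [hz]
      simp only [List.map_const', List.sum_replicate, smul_zero, zero_add]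
      exact ih p m q hnd' hq
    · rw [if_neg hc]
      simp only [List.nil_append]
      exact ih p m q hnd' hq

-- B's result equals the tri skeleton with A's weights
lemma sum_subset_keys (books keys : List String) (f : String → Int)
    (hnb : books.Nodup) (hnk : keys.Nodup) (hsub : ∀ b ∈ keys, b ∈ books)
    (hz : ∀ b ∈ books, b ∉ keys → f b = 0) :
    (books.map f).sum = (keys.map f).sum := by
  rw [← List.sum_toFinset f hnb, ← List.sum_toFinset f hnk]
  refine (Finset.sum_subset ?_ ?_).symm
  · intro b hb
    exact List.mem_toFinset.mpr (hsub b (List.mem_toFinset.mp hb))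
  · intro b hb hnb'
    exact hz b (List.mem_toFinset.mp hb) (fun h => hnb' (List.mem_toFinset.mpr h))

-- the grand weight lemma: B's pair dict agrees with A's pair weight for p before q
lemma w_getD (datadict : List (String × List (String × Int)))
    (a : List String) (p : String) (m : List String) (q : String)
    (hk : (toDict datadict).keys = a ++ p :: m) (hq : q ∈ m) :
    (((toDict datadict).keys.foldl
        (fun bb r =>
          (PySem.Dict.getD (toDict datadict) r PySem.Dict.empty).items.foldl
            (fun bb bc => bb.modify bc.1 [] (· ++ [(r, bc.2)])) bb)
        PySem.Dict.empty).values.foldl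
          (fun w readers => pairAcc readers w) PySem.Dict.empty).getD (p, q) 0
    = AW (toDict datadict) p q := by
  set d := toDict datadict with hd
  have hnd : d.keys.Nodup := PySem.Dict.nodup_keys_ofList _
  rw [byBook_eq d]
  set bb := (entriesOf d).foldl (fun bb e => bb.modify e.1 [] (· ++ [e.2])) PySem.Dict.empty with hbb
  have hbbnd : bb.keys.Nodup := by
    rw [hbb]
    exact PySem.Dict.nodup_keys_foldl_modify_key (entriesOf d) (fun e => e.1) []
      (fun _ e v => v ++ [e.2]) PySem.Dict.empty (by simp [PySem.Dict.keys_empty])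
  rw [PySem.Dict.values_eq_map_keys bb hbbnd []]
  rw [foldl_pairAcc, PySem.Dict.getD_empty, zero_add, List.map_map]
  have hrd : ∀ b, bb.getD b [] = rOf d b d.keys := fun b => rd_eq datadict b
  have hmap : bb.keys.map ((fun R => SP R (p, q)) ∘ (fun k => bb.getD k []))
      = bb.keys.map (fun b => if ((bk d p).contains b && (bk d q).contains b)
          then sgn ((bk d p).getD b 0) ((bk d q).getD b 0) else 0) := by
    apply List.map_congr_left
    intro b _
    simp only [Function.comp]
    rw [hrd b, hk]
    exact SP_rOf d b a p m q (hk ▸ hnd) hq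
  rw [hmap]
  -- collapse the sum over all books to the sum over q's books
  have hqkeys : (bk d q).keys.Nodup := bk_nodup datadict q
  have hqmem : q ∈ d.keys := by rw [hk]; simp [hq]
  have hbkeys : bb.keys = PySem.Set.ofList ((entriesOf d).map (fun e => e.1)) := by
    rw [hbb]
    rw [PySem.Dict.keys_foldl_modify_key (entriesOf d) (fun e => e.1) []
      (fun _ e v => v ++ [e.2]) PySem.Dict.empty]
    rw [PySem.Dict.keys_empty]
    rfl
  have hsub : ∀ b ∈ (bk d q).keys, b ∈ bb.keys := by
    intro b hb
    rw [hbkeys]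
    apply (PySem.Set.mem_ofList _ _).mpr
    apply List.mem_map.mpr
    have hex : ∃ c, (b, c) ∈ (bk d q).items := by
      simpa [PySem.Dict.keys] using hb
    rcases hex with ⟨c, hc⟩
    refine ⟨(b, (q, c)), ?_, rfl⟩
    unfold entriesOf
    apply List.mem_flatMap.mpr
    exact ⟨q, hqmem, List.mem_map.mpr ⟨(b, c), hc, rfl⟩⟩
  rw [sum_subset_keys bb.keys (bk d q).keys _ hbbnd hqkeys hsub ?hz]
  · unfold AW
    apply congrArg
    apply List.map_congr_left
    intro b hb
    have hcq : (bk d q).contains b = true := (PySem.Dict.contains_iff_mem_keys _ _).mpr hb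
    unfold term sgn
    by_cases hcp : (bk d p).contains b <;> simp [hcp, hcq]
  · intro b _ hb
    have hcq : (bk d q).contains b = false := by
      cases hc : (bk d q).contains b
      · rfl
      · exact absurd ((PySem.Dict.contains_iff_mem_keys _ _).mp hc) hb
    simp [hcq]

lemma B_eq_tri (datadict : List (String × List (String × Int))) :
    WeightedEdge_Create_alt datadict = tri (AW (toDict datadict)) (toDict datadict).keys := by
  unfold WeightedEdge_Create_alt
  simp only []
  set d := toDict datadict with hd
  set w := (d.keys.foldl
        (fun bb r =>
          (PySem.Dict.getD d r PySem.Dict.empty).items.foldl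
            (fun bb bc => bb.modify bc.1 [] (· ++ [(r, bc.2)])) bb)
        PySem.Dict.empty).values.foldl (fun w readers => pairAcc readers w) PySem.Dict.empty
    with hw
  have main : ∀ (l a : List String), d.keys = a ++ l → emitPairs l w = tri (AW d) l := by
    intro l
    induction l with
    | nil => intro a _; simp [emitPairs, tri]
    | cons p rest ih =>
      intro a hk
      simp only [emitPairs, tri]
      congr 1
      · apply List.map_congr_left
        intro q hq
        have := w_getD datadict a p rest q hk hq
        rw [hw, hd]
        rw [this]
      · exact ih (a ++ [p]) (by simpa using hk)
  exact main d.keys [] rfl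

-- ===== VERDICT (by name: the statement is the Claim_ definition above) =====
theorem WeightedEdge_Create_spec : Claim_equal_WeightedEdge_Create := by
  intro datadict _
  unfold Spec_WeightedEdge_Create
  rw [A_eq_tri, B_eq_tri]
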